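-- pv_equiv track=rewrite | github.com/fodisi/ByteAcademy-Bootcamp | w1/d1/homework/wtf.py | get_totatives
-- ===== SOURCE A (Python) =====
-- def intersection_count(lst1, lst2):
--     return len(list(set(lst1) & set(lst2)))
--
-- def compute_divisors(num):
-- 	return [x for x in range(1, num + 1) if num % x == 0]
--
-- def get_totatives(num):
-- 	num_divisors = compute_divisors(num)
-- 	totatives = []
-- 	for x in range(1, num):
-- 		current_divisors = compute_divisors(x)
-- 		if intersection_count(num_divisors, current_divisors) == 1:
-- 			totatives.append(x)
-- 	#return [x for x in range(1, num) if intersection_count(num_divisors, compute_divisors(x)) == 1]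
-- 	return totatives
-- ===== SOURCE B (Python) =====
-- def get_totatives(num):
--     # Euclid's algorithm instead of building divisor lists and intersecting sets.
--     def gcd(a, b):
--         while b:
--             a, b = b, a % b
--         return a
--     return [x for x in range(1, num) if gcd(num, x) == 1]
-- ===== Notes on version B (the rewrite author's own statement) =====
-- stated objective: faster
-- what changed: Replaces the per-candidate divisor-list construction and set intersection count by a direct Euclidean gcd test (gcd(num,x)==1), removing both divisor enumerations entirely.
import Mathlib
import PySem

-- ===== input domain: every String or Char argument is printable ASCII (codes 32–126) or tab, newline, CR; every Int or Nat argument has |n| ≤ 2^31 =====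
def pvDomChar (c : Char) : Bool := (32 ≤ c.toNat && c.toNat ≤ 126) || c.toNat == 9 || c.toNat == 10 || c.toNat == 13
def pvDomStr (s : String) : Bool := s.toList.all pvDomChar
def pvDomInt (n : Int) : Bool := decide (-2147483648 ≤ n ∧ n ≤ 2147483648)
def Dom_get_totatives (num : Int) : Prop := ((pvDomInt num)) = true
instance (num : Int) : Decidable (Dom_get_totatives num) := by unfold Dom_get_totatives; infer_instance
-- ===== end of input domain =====

-- B replaces A's divisor-list construction + set-intersection count by a direct Euclidean gcd test (faster).


-- ===== PORT A =====
def intersection_count (lst1 lst2 : List Int) : Int :=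
  ((PySem.Set.ofList lst1).inter (PySem.Set.ofList lst2)).length

def compute_divisors (num : Int) : List Int :=
  (PySem.List.pyRange 1 (num + 1)).filter (fun x => PySem.Int.mod num x == 0)

def get_totatives (num : Int) : List Int :=
  let num_divisors := compute_divisors num
  (PySem.List.pyRange 1 num).foldl
    (fun totatives x =>
      let current_divisors := compute_divisors x
      if intersection_count num_divisors current_divisors == 1 then totatives ++ [x]
      else totatives) []

-- ===== PORT B =====
-- termination lemma for the Euclidean loop (Python '%' has the divisor's sign, so |a % b| < |b|)
theorem pymod_natAbs_lt (a : Int) {b : Int} (h : b ≠ 0) :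
    (PySem.Int.mod a b).natAbs < b.natAbs := by
  rcases lt_or_gt_of_ne h with hb | hb
  · have := PySem.Int.mod_neg_bounds a hb
    omega
  · have h1 := PySem.Int.mod_nonneg a hb
    have h2 := PySem.Int.mod_lt a hb
    omega

def pygcd (a b : Int) : Int :=
  if h : b = 0 then a else pygcd b (PySem.Int.mod a b)
termination_by b.natAbs
decreasing_by exact pymod_natAbs_lt a h

def get_totatives_alt (num : Int) : List Int :=
  (PySem.List.pyRange 1 num).filter (fun x => pygcd num x == 1)

-- ===== PRECONDITION & SPEC =====
def Spec_get_totatives (num : Int) (out : List Int) : Prop := out = get_totatives_alt num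
instance (num : Int) (out : List Int) : Decidable (Spec_get_totatives num out) := by unfold Spec_get_totatives; infer_instance

-- ===== CLAIM (what is proved, stated in full; the proofs are below) =====
def Claim_equal_get_totatives : Prop := ∀ (num : Int), Dom_get_totatives num → Spec_get_totatives num (get_totatives num)

-- ===== LEMMAS AND PROOFS =====

theorem pygcd_eq_gcd (a b : Int) (ha : 0 ≤ a) (hb : 0 ≤ b) :
    pygcd a b = (Int.gcd a b : Int) := by
  by_cases h : b = 0
  · subst h
    rw [pygcd]
    simp [Int.gcd, Int.natAbs_of_nonneg ha]
  · have hbpos : 0 < b := lt_of_le_of_ne hb (Ne.symm h)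
    rw [pygcd]
    simp only [h, dite_false]
    rw [PySem.Int.mod_eq_emod_of_pos hbpos,
      pygcd_eq_gcd b (a % b) hb (Int.emod_nonneg a h),
      Int.gcd_comm b (a % b), Int.gcd_emod]
termination_by b.natAbs
decreasing_by
  have := pymod_natAbs_lt a h
  rwa [PySem.Int.mod_eq_emod_of_pos hbpos] at this

theorem mem_divisors {n d : Int} (hn : 1 ≤ n) :
    d ∈ compute_divisors n ↔ 1 ≤ d ∧ d ∣ n := by
  unfold compute_divisors
  simp only [List.mem_filter, PySem.List.mem_pyRange_one, beq_iff_eq,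
    PySem.Int.mod_eq_zero_iff_dvd]
  constructor
  · rintro ⟨⟨h1, _⟩, h2⟩; exact ⟨h1, h2⟩
  · rintro ⟨h1, h2⟩
    exact ⟨⟨h1, by have := Int.le_of_dvd (by omega) h2; omega⟩, h2⟩

theorem nodup_two_mem_length {l : List Int} (hnd : l.Nodup) {a b : Int}
    (ha : a ∈ l) (hb : b ∈ l) (hab : a ≠ b) : l.length ≠ 1 := by
  cases l with
  | nil => simp at ha
  | cons x t =>
    cases t with
    | nil =>
      simp only [List.mem_singleton] at ha hb
      exact fun _ => hab (ha.trans hb.symm)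
    | cons y t' => simp

theorem all_one_length {l : List Int} (hnd : l.Nodup) (hone : (1:Int) ∈ l)
    (hall : ∀ y ∈ l, y = 1) : l.length = 1 := by
  cases l with
  | nil => simp at hone
  | cons x t =>
    cases t with
    | nil => simp
    | cons y t' =>
      have hx := hall x (by simp)
      have hy := hall y (by simp)
      rw [List.nodup_cons] at hnd
      exact absurd (show x ∈ y :: t' by simp [hx, hy]) hnd.1

theorem count_eq_gcd {n x : Int} (hn : 2 ≤ n) (hx : 1 ≤ x) :
    (intersection_count (compute_divisors n) (compute_divisors x) == 1)
      = (pygcd n x == 1) := by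
  have hmem : ∀ d : Int,
      d ∈ (PySem.Set.ofList (compute_divisors n)).inter (PySem.Set.ofList (compute_divisors x))
        ↔ 1 ≤ d ∧ d ∣ n ∧ d ∣ x := by
    intro d
    rw [PySem.Set.mem_inter, PySem.Set.mem_ofList, PySem.Set.mem_ofList,
      mem_divisors (by omega), mem_divisors hx]
    tauto
  have hnd := PySem.Set.nodup_inter (PySem.Set.ofList (compute_divisors n))
    (PySem.Set.ofList (compute_divisors x)) (PySem.Set.nodup_ofList _)
  have hone : (1:Int) ∈ (PySem.Set.ofList (compute_divisors n)).inter
      (PySem.Set.ofList (compute_divisors x)) := (hmem 1).2 ⟨le_refl 1, one_dvd n, one_dvd x⟩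
  rw [pygcd_eq_gcd n x (by omega) (by omega)]
  unfold intersection_count
  by_cases hg : Int.gcd n x = 1
  · have hlen : ((PySem.Set.ofList (compute_divisors n)).inter
        (PySem.Set.ofList (compute_divisors x))).length = 1 := by
      apply all_one_length hnd hone
      intro y hy
      rcases (hmem y).1 hy with ⟨hy1, hyn, hyx⟩
      have hdg : y ∣ ((Int.gcd n x : Nat) : Int) := Int.dvd_coe_gcd hyn hyx
      rw [hg] at hdg
      have := Int.le_of_dvd (by omega) hdg
      omega
    rw [hlen, hg]
  · have hg0 : Int.gcd n x ≠ 0 := by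
      intro h0
      have := Int.eq_zero_of_gcd_eq_zero_left h0
      omega
    have hgm : ((Int.gcd n x : Nat) : Int) ∈ (PySem.Set.ofList (compute_divisors n)).inter
        (PySem.Set.ofList (compute_divisors x)) :=
      (hmem _).2 ⟨by exact_mod_cast Nat.one_le_iff_ne_zero.2 hg0,
        Int.gcd_dvd_left n x, Int.gcd_dvd_right n x⟩
    have hlenne := nodup_two_mem_length hnd hone hgm
      (by intro h; exact hg (by exact_mod_cast h.symm))
    have hL : ((((PySem.Set.ofList (compute_divisors n)).inter
        (PySem.Set.ofList (compute_divisors x))).length : Int) == 1) = false := by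
      rw [beq_eq_false_iff_ne]
      intro h
      exact hlenne (by exact_mod_cast h)
    have hR : (((Int.gcd n x : Nat) : Int) == 1) = false := by
      rw [beq_eq_false_iff_ne]
      intro h
      exact hg (by exact_mod_cast h)
    rw [hL, hR]

-- ===== VERDICT (by name: the statement is the Claim_ definition above) =====
theorem get_totatives_spec : Claim_equal_get_totatives := by
  intro num _
  unfold Spec_get_totatives get_totatives get_totatives_alt
  show (PySem.List.pyRange 1 num).foldl
      (fun totatives x =>
        if (intersection_count (compute_divisors num) (compute_divisors x) == 1) = true
        then totatives ++ [(fun y => y) x] else totatives) []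
    = (PySem.List.pyRange 1 num).filter (fun x => pygcd num x == 1)
  rw [PySem.List.foldl_append_if]
  rw [List.nil_append, List.map_id']
  apply List.filter_congr
  intro x hx
  rw [PySem.List.mem_pyRange_one] at hx
  exact count_eq_gcd (by omega) hx.1
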